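-- pv_equiv track=rewrite | github.com/0Lunar/Challenges | Olicyber/web/hcaptcha/solve.py | split_nums_ascii
-- ===== SOURCE A (Python) =====
-- def find_all(text: str, to_find: str) -> list[int]:
--     out = []
--
--     for i in range(len(text)):
--         if text[i:i+len(to_find)] == to_find:
--             out.append(i)
--
--     return out
--
-- def find_common(lt: list[list]) -> list:
--     common = set(lt[0])
--
--     for sl in lt[1:]:
--         common &= set(sl)
--
--     common = list(common)
--     common.sort()
--
--     return common
--
-- def split_nums_ascii(figlet: str) -> list[str]:
--     nums = []
--
--     _figlet = figlet.split("\n")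
--     spaces = [find_all(_, " ") for _ in _figlet]
--
--     num_start = find_common(spaces) # type: ignore
--     num_start = [-1] + num_start    # type: ignore
--
--     for n in range(len(num_start) - 2):
--         tmp = ""
--
--         for i in range(len(_figlet)):
--             tmp += _figlet[i][num_start[n]+1:num_start[n+1]].rstrip() + "\n"
--
--         nums.append(tmp)
--
--     return nums
-- ===== SOURCE B (Python) =====
-- def split_nums_ascii(figlet: str) -> list[str]:
--     lines = figlet.split("\n")
--     m = min(len(l) for l in lines)
--     cols = [c for c in range(m) if all(l[c] == " " for l in lines)]
--     blocks = []
--     prev = 0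
--     for c in cols[:-1]:
--         blocks.append("".join(l[prev:c].rstrip() + "\n" for l in lines))
--         prev = c + 1
--     return blocks
-- ===== Notes on version B (the rewrite author's own statement) =====
-- stated objective: simpler
-- what changed: Replaces the per-line space-index lists plus set intersection plus sort with a direct column-major scan (a column is kept when every line has a space there, already in order), and replaces the [-1]-prefixed index list with a running previous-cut accumulator over all common columns but the last.
import Mathlib
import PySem

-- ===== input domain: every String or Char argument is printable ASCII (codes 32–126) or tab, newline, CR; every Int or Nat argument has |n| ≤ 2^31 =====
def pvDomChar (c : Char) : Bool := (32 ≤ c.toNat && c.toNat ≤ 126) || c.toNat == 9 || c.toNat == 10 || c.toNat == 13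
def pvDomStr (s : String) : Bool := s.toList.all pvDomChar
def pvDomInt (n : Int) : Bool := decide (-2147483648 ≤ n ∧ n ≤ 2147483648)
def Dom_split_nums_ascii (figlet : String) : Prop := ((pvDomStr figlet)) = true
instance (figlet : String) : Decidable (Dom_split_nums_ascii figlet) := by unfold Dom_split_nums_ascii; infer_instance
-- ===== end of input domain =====

-- B replaces A's per-line space-index lists + set intersection + sort by a direct column-major
-- scan and a running previous-cut accumulator; same return value, objective: simpler.

-- ===== PORT A =====
-- find_all(text, to_find)
def findAllA (text : List Char) (toFind : List Char) : List Int :=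
  (PySem.List.pyRange 0 (PySem.Chars.len text) 1).foldl
    (fun out i =>
      if PySem.Chars.slice text (some i) (some (i + PySem.Chars.len toFind)) = toFind
      then out ++ [i] else out) []

-- find_common(lt); Python raises IndexError on lt = [] (the [] branch is unreachable at the
-- only call site, since str.split("\n") always returns a nonempty list)
def findCommonA (lt : List (List Int)) : List Int :=
  match lt with
  | [] => []
  | hd :: tl =>
    let common := tl.foldl (fun c sl => PySem.Set.inter c (PySem.Set.ofList sl)) (PySem.Set.ofList hd)
    -- common = list(common); common.sort(): sorting the set's elements, order-independent
    PySem.List.sorted common (fun x => x) false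

def split_nums_ascii (figlet : String) : List String :=
  let _figlet := PySem.Chars.splitOn figlet.toList ['\n']
  let spaces := _figlet.map (fun l => findAllA l [' '])
  let numStart := (-1 : Int) :: findCommonA spaces
  (PySem.List.pyRange 0 (PySem.List.len numStart - 2) 1).foldl
    (fun nums n =>
      let tmp := (PySem.List.pyRange 0 (PySem.List.len _figlet) 1).foldl
        (fun tmp i =>
          tmp ++ PySem.Chars.rstrip (PySem.Chars.slice (PySem.List.pyGetD _figlet i [])
                   (some (PySem.List.pyGetD numStart n 0 + 1))
                   (some (PySem.List.pyGetD numStart (n + 1) 0))) ++ ['\n']) []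
      nums ++ [String.ofList tmp]) []

-- ===== PORT B =====
def split_nums_ascii_alt (figlet : String) : List String :=
  let lines := PySem.Chars.splitOn figlet.toList ['\n']
  -- m = min(len(l) for l in lines); lines is nonempty, so min? is some and the default is unreachable
  let m := (PySem.List.min? (lines.map PySem.Chars.len) (fun x => x)).getD 0
  -- l[c] with 0 ≤ c < m never raises; 'pyGet? l c = some ' '' is exactly l[c] == " " there
  let cols := (PySem.List.pyRange 0 m 1).filter
    (fun c => lines.all (fun l => PySem.Chars.pyGet? l c == some ' '))
  ((PySem.List.slice cols none (some (-1))).foldl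
    (fun (st : List String × Int) c =>
      (st.1 ++ [String.ofList (PySem.Chars.join []
          (lines.map (fun l => PySem.Chars.rstrip (PySem.Chars.slice l (some st.2) (some c)) ++ ['\n'])))],
       c + 1)) ([], 0)).1

-- ===== PRECONDITION & SPEC =====
def Spec_split_nums_ascii (figlet : String) (out : List String) : Prop := out = split_nums_ascii_alt figlet
instance (figlet : String) (out : List String) : Decidable (Spec_split_nums_ascii figlet out) := by unfold Spec_split_nums_ascii; infer_instance

-- ===== CLAIM (what is proved, stated in full; the proofs are below) =====
def Claim_equal_split_nums_ascii : Prop := ∀ (figlet : String), Dom_split_nums_ascii figlet → Spec_split_nums_ascii figlet (split_nums_ascii figlet)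

-- ===== LEMMAS AND PROOFS =====

-- "".join(parts) is concatenation
theorem join_nil_eq_flatten (parts : List (List Char)) :
    PySem.Chars.join [] parts = parts.flatten := by
  simp only [PySem.Chars.join, List.intercalate]
  induction parts with
  | nil => rfl
  | cons p ps ih =>
    cases ps with
    | nil => simp
    | cons q qs => simp_all [List.intersperse]

theorem splitOn_go_ne_nil (sep : List Char) (fuel : Nat) : ∀ (l cur : List Char)
    (acc : List (List Char)), PySem.Chars.splitOn.go sep fuel l cur acc ≠ [] := by
  induction fuel with
  | zero => intro l cur acc; simp [PySem.Chars.splitOn.go]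
  | succ fuel ih =>
    intro l cur acc
    cases l with
    | nil => simp [PySem.Chars.splitOn.go]
    | cons c rest =>
      rw [PySem.Chars.splitOn.go]
      split
      · exact ih _ _ _
      · exact ih _ _ _

theorem splitOn_ne_nil (s sep : List Char) : PySem.Chars.splitOn s sep ≠ [] := by
  unfold PySem.Chars.splitOn; exact splitOn_go_ne_nil _ _ _ _ _

theorem pyGet?_nonneg (l : List Char) (c : Int) (x : Char) (h : 0 ≤ c) :
    PySem.Chars.pyGet? l c = some x ↔ l[c.toNat]? = some x := by
  simp only [PySem.Chars.pyGet?, PySem.List.pyGet?, PySem.List.pyIdx?]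
  split_ifs with hlt
  · simp
  · constructor
    · simp
    · intro hx
      have : c.toNat < l.length := (List.getElem?_eq_some_iff.mp hx).1
      omega

theorem pyGet?_lt_len (l : List Char) (c : Int) (x : Char) (h0 : 0 ≤ c)
    (h : PySem.Chars.pyGet? l c = some x) : c.toNat < l.length := by
  rw [pyGet?_nonneg l c x h0] at h
  exact (List.getElem?_eq_some_iff.mp h).1

-- membership in find_all(line, " ")
theorem mem_findAllA (l : List Char) (c : Int) :
    c ∈ findAllA l [' '] ↔ 0 ≤ c ∧ PySem.Chars.pyGet? l c = some ' ' := by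
  unfold findAllA
  rw [PySem.List.foldl_append_ite_eq_filter]
  simp only [List.nil_append, List.mem_filter, PySem.List.mem_pyRange_one, decide_eq_true_iff]
  constructor
  · rintro ⟨⟨h0, hlen⟩, hs⟩
    refine ⟨h0, ?_⟩
    rw [pyGet?_nonneg _ _ _ h0]
    have hlen' : c.toNat < l.length := by
      simp [PySem.Chars.len] at hlen; omega
    rw [PySem.Chars.slice, PySem.List.slice_toNat _ h0 (by simp [PySem.Chars.len]; omega)] at hs
    have h1 : (c + PySem.Chars.len [' ']).toNat - c.toNat = 1 := by
      simp [PySem.Chars.len]; omega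
    rw [h1, List.take_one, List.head?_drop] at hs
    cases hx : l[c.toNat]? with
    | none => simp [hx] at hs
    | some y => simp [hx] at hs ⊢; simpa using hs
  · rintro ⟨h0, hg⟩
    rw [pyGet?_nonneg _ _ _ h0] at hg
    have hlt : c.toNat < l.length := (List.getElem?_eq_some_iff.mp hg).1
    refine ⟨⟨h0, by simp [PySem.Chars.len]; omega⟩, ?_⟩
    rw [PySem.Chars.slice, PySem.List.slice_toNat _ h0 (by simp [PySem.Chars.len]; omega)]
    have h1 : (c + PySem.Chars.len [' ']).toNat - c.toNat = 1 := by
      simp [PySem.Chars.len]; omega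
    rw [h1, List.take_one, List.head?_drop, hg]
    rfl

-- the intersection fold of find_common
theorem mem_interFold (tl : List (List Int)) (s : PySem.Set Int) (x : Int) :
    x ∈ tl.foldl (fun c sl => PySem.Set.inter c (PySem.Set.ofList sl)) s ↔
      x ∈ s ∧ ∀ sl ∈ tl, x ∈ sl := by
  induction tl generalizing s with
  | nil => simp
  | cons hd tl ih =>
    simp only [List.foldl_cons, ih, PySem.Set.mem_inter, PySem.Set.mem_ofList, List.mem_cons]
    constructor
    · rintro ⟨⟨h1, h2⟩, h3⟩
      exact ⟨h1, by rintro sl (rfl | hsl); exact h2; exact h3 sl hsl⟩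
    · rintro ⟨h1, h2⟩
      exact ⟨⟨h1, h2 hd (Or.inl rfl)⟩, fun sl hsl => h2 sl (Or.inr hsl)⟩

theorem nodup_interFold (tl : List (List Int)) (s : PySem.Set Int) (hs : s.Nodup) :
    (tl.foldl (fun c sl => PySem.Set.inter c (PySem.Set.ofList sl)) s).Nodup := by
  induction tl generalizing s with
  | nil => exact hs
  | cons hd tl ih => exact ih _ (PySem.Set.nodup_inter _ _ hs)

-- the central fact: A's sorted common space columns = B's column scan
theorem common_eq_cols (L : List (List Char)) (hL : L ≠ []) :
    findCommonA (L.map (fun l => findAllA l [' '])) =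
      (PySem.List.pyRange 0 ((PySem.List.min? (L.map PySem.Chars.len) (fun x => x)).getD 0) 1).filter
        (fun c => L.all (fun l => PySem.Chars.pyGet? l c == some ' ')) := by
  obtain ⟨hd, tl, rfl⟩ := List.exists_cons_of_ne_nil hL
  obtain ⟨m₀, hmin⟩ : ∃ m₀, PySem.List.min? ((hd :: tl).map PySem.Chars.len) (fun x => x) = some m₀ := by
    cases h : PySem.List.min? ((hd :: tl).map PySem.Chars.len) (fun x => x) with
    | none => exact absurd ((PySem.List.min?_eq_none_iff _ _).mp h) (by simp)
    | some m₀ => exact ⟨m₀, rfl⟩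
  simp only [List.map_cons, findCommonA]
  apply PySem.List.sorted_eq_of_perm_of_pairwise_lt
  · rw [List.perm_ext_iff_of_nodup]
    · intro x
      simp only [List.map_cons] at hmin
      rw [hmin]
      simp only [List.mem_filter, PySem.List.mem_pyRange_one, Option.getD_some,
        mem_interFold, PySem.Set.mem_ofList, mem_findAllA, List.all_eq_true, beq_iff_eq,
        List.mem_map]
      constructor
      · rintro ⟨⟨h0, hm⟩, hall⟩
        refine ⟨⟨h0, ?_⟩, ?_⟩
        · exact hall hd (by simp)
        · rintro sl ⟨l, hl, rfl⟩
          exact (mem_findAllA l x).mpr ⟨h0, hall l (by simp [hl])⟩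
      · rintro ⟨⟨h0, hhd⟩, hall⟩
        have hget : ∀ l ∈ hd :: tl, PySem.Chars.pyGet? l x = some ' ' := by
          rintro l hl
          rcases List.mem_cons.mp hl with rfl | hl'
          · exact hhd
          · exact ((mem_findAllA l x).mp (hall _ ⟨l, hl', rfl⟩)).2
        refine ⟨⟨h0, ?_⟩, hget⟩
        rw [← List.map_cons] at hmin
        have hm_mem := PySem.List.min?_mem hmin
        obtain ⟨l₀, hl₀, hlen₀⟩ := List.mem_map.mp hm_mem
        have hg := hget l₀ hl₀
        have hlt : x.toNat < l₀.length := pyGet?_lt_len l₀ x ' ' h0 hg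
        have : PySem.Chars.len l₀ = (l₀.length : Int) := by simp [PySem.Chars.len]
        omega
    · exact (PySem.List.nodup_pyRange_one _ _).filter _
    · exact nodup_interFold _ _ (PySem.Set.nodup_ofList _)
  · exact (PySem.List.pairwise_lt_pyRange_one _ _).filter _

-- B's accumulator loop as a map over (prev, c) pairs
theorem bfold (F : Int → Int → String) (cs : List Int) : ∀ (prev : Int) (acc : List String),
    (cs.foldl (fun (st : List String × Int) c => (st.1 ++ [F st.2 c], c + 1)) (acc, prev)).1
      = acc ++ (List.zip (prev :: cs.map (· + 1)) cs).map (fun pc => F pc.1 pc.2) := by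
  induction cs with
  | nil => simp
  | cons c cs ih =>
    intro prev acc
    simp only [List.foldl_cons, ih, List.map_cons, List.zip_cons_cons]
    simp

-- A's indexed bounds = B's running pairs
theorem idx_pairs (K : List Int) :
    (List.range (K.length - 1)).map
        (fun k => ((((-1 : Int) :: K).getD k 0) + 1, ((-1 : Int) :: K).getD (k + 1) 0))
      = List.zip ((0 : Int) :: K.dropLast.map (· + 1)) K.dropLast := by
  apply List.ext_getElem
  · simp [List.length_zip]
  · intro i h1 h2
    simp only [List.getElem_map, List.getElem_range, List.getElem_zip]
    have hi : i < K.length - 1 := by simpa using h1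
    have hKd : i < K.dropLast.length := by simp; omega
    have e2 : ((-1 : Int) :: K).getD (i + 1) 0 = K.dropLast[i] := by
      rw [List.getD_eq_getElem _ _ (by simp; omega), List.getElem_dropLast]
      simp
    rw [e2]
    cases i with
    | zero =>
      simp [List.getD]
    | succ j =>
      have hj : j < K.dropLast.length := by simp; omega
      have e1 : ((-1 : Int) :: K).getD (j + 1) 0 = K.dropLast[j] := by
        rw [List.getD_eq_getElem _ _ (by simp; omega), List.getElem_dropLast]
        simp
      rw [e1]
      simp [List.getElem_cons_succ]

-- ===== VERDICT (by name: the statement is the Claim_ definition above) =====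
theorem split_nums_ascii_spec : Claim_equal_split_nums_ascii := by
  intro figlet _
  unfold Spec_split_nums_ascii
  simp only [split_nums_ascii, split_nums_ascii_alt]
  set L := PySem.Chars.splitOn figlet.toList ['\n'] with hLdef
  have hL : L ≠ [] := splitOn_ne_nil _ _
  rw [← common_eq_cols L hL]
  set K := findCommonA (L.map fun l => findAllA l [' ']) with hKdef
  rw [PySem.List.slice_to_neg_one]
  rw [bfold (F := fun p c => String.ofList (PySem.Chars.join []
        (L.map (fun l => PySem.Chars.rstrip (PySem.Chars.slice l (some p) (some c)) ++ ['\n']))))]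
  rw [PySem.List.foldl_append_singleton_eq_map
       (f := fun n => String.ofList ((PySem.List.pyRange 0 (PySem.List.len L) 1).foldl
        (fun tmp i =>
          tmp ++ PySem.Chars.rstrip (PySem.Chars.slice (PySem.List.pyGetD L i [])
                   (some (PySem.List.pyGetD ((-1 : Int) :: K) n 0 + 1))
                   (some (PySem.List.pyGetD ((-1 : Int) :: K) (n + 1) 0))) ++ ['\n']) []))]
  simp only [List.nil_append, PySem.List.len_eq]
  simp only [List.length_cons]
  rw [PySem.List.pyRange_one 0 (((K.length + 1 : Nat) : Int) - 2)]
  have hN : (((K.length + 1 : Nat) : Int) - 2 - 0).toNat = K.length - 1 := by omega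
  rw [hN, List.map_map, ← idx_pairs K, List.map_map]
  apply List.map_congr_left
  intro k hk
  simp only [Function.comp_apply, zero_add]
  rw [PySem.List.foldl_pyRange_zero_pyGetD' L []
    (fun tmp line => tmp ++ PySem.Chars.rstrip (PySem.Chars.slice line
      (some (PySem.List.pyGetD ((-1 : Int) :: K) (↑k) 0 + 1))
      (some (PySem.List.pyGetD ((-1 : Int) :: K) ((↑k : Int) + 1) 0))) ++ ['\n']) []]
  rw [join_nil_eq_flatten]
  simp only [← Nat.cast_add_one, PySem.List.pyGetD_natCast]
  congr 1
  simp only [List.append_assoc]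
  rw [PySem.List.foldl_append_eq_flatMap
    (g := fun line => PySem.Chars.rstrip (PySem.Chars.slice line
      (some (((-1 : Int) :: K).getD k 0 + 1))
      (some (((-1 : Int) :: K).getD (k + 1) 0))) ++ ['\n'])]
  simp [List.flatMap_def]
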